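-- pv_equiv track=rewrite | github.com/MrTejpalSingh/Data_Structures | Small Practise Programs/Fundamentals Python/Module1/RearrangeWordsEvenOddPositions.py | encrypt_sentence
-- ===== SOURCE A (Python) =====
-- def encrypt_sentence(sentence):
--     vowel_set = set("aeiouAEIOU")
--     final_list=[]
--     word=sentence.split()
--     for i in range(0,len(word)):
--         if((i%2)==0):
--             final_list.append(word[i][::-1])
--         else:  # do rearrangement
--             vowels = list()
--             consonants = list()
--             for letter in word[i]:
--                 if letter in vowel_set:
--                     vowels.append(letter)
--                 else:
--                     consonants.append(letter)
--             new_string = "".join(consonants) + "".join(vowels)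
--             final_list.append(new_string)
--     sentence = " ".join(final_list)
--     return sentence
-- ===== SOURCE B (Python) =====
-- VOWELS = set("aeiouAEIOU")
--
-- def encrypt_sentence(sentence):
--     # staged: slice the word list into even/odd positions, transform each group
--     # homogeneously (evens reversed; odds stably SORTED by the boolean is-vowel key,
--     # which is the stable consonants-then-vowels partition), then interleave.
--     words = sentence.split()
--     evens = [w[::-1] for w in words[::2]]
--     odds = ["".join(sorted(w, key=VOWELS.__contains__)) for w in words[1::2]]
--     merged = [w for pair in zip(evens, odds) for w in pair]
--     if len(odds) < len(evens):
--         merged.append(evens[-1])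
--     return " ".join(merged)
-- ===== Notes on version B (the rewrite author's own statement) =====
-- stated objective: alternative
-- what changed: Replaces A's single indexed loop branching on i%2 (with a hand-written append-partition loop inside) by three staged passes: slice the word list into even and odd positions, map reversal over the evens and a stable sort by the boolean is-vowel key over the odds (the stable sort IS the consonants-then-vowels partition), then zip-interleave the two groups with the leftover even word appended.
import Mathlib
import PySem

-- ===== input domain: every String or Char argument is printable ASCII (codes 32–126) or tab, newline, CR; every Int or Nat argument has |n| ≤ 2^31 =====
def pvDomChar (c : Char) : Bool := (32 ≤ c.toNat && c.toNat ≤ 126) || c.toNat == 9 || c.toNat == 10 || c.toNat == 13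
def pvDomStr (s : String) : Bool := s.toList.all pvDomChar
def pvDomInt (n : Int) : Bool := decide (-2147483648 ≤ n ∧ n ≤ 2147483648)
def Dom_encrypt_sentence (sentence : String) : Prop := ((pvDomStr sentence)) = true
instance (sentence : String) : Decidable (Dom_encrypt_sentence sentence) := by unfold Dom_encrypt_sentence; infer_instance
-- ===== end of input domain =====

-- B ("alternative", not faster): instead of A's single indexed i%2 loop with an inner
-- partition loop, B slices the word list into even/odd positions, maps reversal over the
-- evens and a stable sort by the is-vowel key over the odds, then zip-interleaves them.

-- ===== PORT A =====
-- the vowel set literal both Pythons build: set("aeiouAEIOU")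
def pvVowels : PySem.Set Char := PySem.Set.ofList "aeiouAEIOU".toList

-- A's inner loop: one pass appending each letter to vowels or consonants, then join and concat
def pvRearrangeA (w : String) : String :=
  let p := w.toList.foldl
    (fun (acc : List Char × List Char) letter =>
      if PySem.Set.contains pvVowels letter then (acc.1 ++ [letter], acc.2)
      else (acc.1, acc.2 ++ [letter]))
    ([], [])
  String.ofList (p.2 ++ p.1)

def encrypt_sentence (sentence : String) : String :=
  let word := PySem.Str.split₀ sentence
  let final_list := (PySem.List.pyRange 0 (PySem.List.len word) 1).foldl
    (fun acc i =>
      if PySem.Int.mod i 2 = 0 then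
        acc ++ [(PySem.Str.slice? (PySem.List.pyGetD word i "") none none (-1)).getD ""]
      else
        acc ++ [pvRearrangeA (PySem.List.pyGetD word i "")])
    []
  PySem.Str.join " " final_list

-- ===== PORT B =====
-- B's odd-word transform: "".join(sorted(w, key=VOWELS.__contains__)); the boolean key
-- False < True is ported as the Int key 0 < 1
def pvRearrB (w : String) : String :=
  String.ofList (PySem.List.sorted w.toList
    (fun c => if PySem.Set.contains pvVowels c then (1 : Int) else 0) false)

def encrypt_sentence_alt (sentence : String) : String :=
  let words := PySem.Str.split₀ sentence
  let evens := ((PySem.List.slice? words none none 2).getD []).map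
      (fun w => (PySem.Str.slice? w none none (-1)).getD "")
  let odds := ((PySem.List.slice? words (some 1) none 2).getD []).map pvRearrB
  let merged := (evens.zip odds).flatMap (fun p => [p.1, p.2])
  let merged := if PySem.List.len odds < PySem.List.len evens
                then merged ++ [(PySem.List.pyGet? evens (-1)).getD ""] else merged
  PySem.Str.join " " merged

-- ===== PRECONDITION & SPEC =====
def Spec_encrypt_sentence (sentence : String) (out : String) : Prop := out = encrypt_sentence_alt sentence
instance (sentence : String) (out : String) : Decidable (Spec_encrypt_sentence sentence out) := by unfold Spec_encrypt_sentence; infer_instance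

-- ===== CLAIM (what is proved, stated in full; the proofs are below) =====
def Claim_equal_encrypt_sentence : Prop := ∀ (sentence : String), Dom_encrypt_sentence sentence → Spec_encrypt_sentence sentence (encrypt_sentence sentence)

-- ===== LEMMAS AND PROOFS =====

-- proof-side helpers ------------------------------------------------------

-- every second element starting at the head (what ws[::2] yields)
def pvEvery2 {α : Type} : List α → List α
  | [] => []
  | [a] => [a]
  | a :: _ :: t => a :: pvEvery2 t

theorem pvEvery2_cons {α : Type} (a : α) (t : List α) :
    pvEvery2 (a :: t) = a :: pvEvery2 t.tail := by
  cases t <;> simp [pvEvery2]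

theorem pv_getLast?_cons {β : Type} (x : β) (l : List β) (h : l ≠ []) :
    (x :: l).getLast? = l.getLast? := by
  cases l with
  | nil => exact absurd rfl h
  | cons b t => simp

-- the common interleaved result both programs produce
def pvInterleave : List String → List String
  | [] => []
  | [w] => [String.ofList w.toList.reverse]
  | w :: nxt :: t => String.ofList w.toList.reverse :: pvRearrB nxt :: pvInterleave t

-- the stable sort by the 0/1 is-vowel key is the consonants-then-vowels partition ------

theorem pv_insertBy_cons (x : Char) (l : List Char)
    (key : Char → Int) (hx : key x = 1) (hl : ∀ a ∈ l, key a ≤ 1) :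
    PySem.List.insertBy (fun a b => decide (key a < key b)) x l = l ++ [x] := by
  apply PySem.List.insertBy_of_forall_not_before
  intro y hy
  simp only [decide_eq_false_iff_not, not_lt, hx]
  exact hl y hy

theorem pv_insertBy_mid (x : Char) (c v : List Char) (key : Char → Int)
    (hx : key x = 0) (hc : ∀ a ∈ c, key a = 0) (hv : ∀ a ∈ v, key a = 1) :
    PySem.List.insertBy (fun a b => decide (key a < key b)) x (c ++ v)
      = (c ++ [x]) ++ v := by
  induction c with
  | nil =>
    cases v with
    | nil => simp [PySem.List.insertBy]
    | cons h t =>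
      have : key h = 1 := hv h (by simp)
      simp [PySem.List.insertBy, hx, this]
  | cons y c ih =>
    have hy : key y = 0 := hc y (by simp)
    simp only [List.cons_append, PySem.List.insertBy, hx, hy]
    rw [if_neg (by simp)]
    simp [ih (fun a ha => hc a (by simp [ha]))]

theorem pv_foldl_insertBy (key : Char → Int) (p : Char → Bool)
    (hkey : ∀ a, key a = if p a then 1 else 0) :
    ∀ (l c v : List Char), (∀ a ∈ c, key a = 0) → (∀ a ∈ v, key a = 1) →
    l.foldl (fun acc x => PySem.List.insertBy (fun a b => decide (key a < key b)) x acc) (c ++ v)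
      = (c ++ l.filter (fun x => !p x)) ++ (v ++ l.filter p) := by
  intro l
  induction l with
  | nil => intro c v _ _; simp
  | cons x t ih =>
    intro c v hc hv
    rw [List.foldl_cons]
    by_cases hp : p x = true
    · have hx : key x = 1 := by rw [hkey]; simp [hp]
      rw [pv_insertBy_cons x (c ++ v) key hx (by
        intro a ha
        rcases List.mem_append.mp ha with h | h
        · rw [hc a h]; omega
        · rw [hv a h])]
      rw [List.append_assoc]
      rw [ih c (v ++ [x]) hc (by
        intro a ha
        rcases List.mem_append.mp ha with h | h
        · exact hv a h
        · simp at h; subst h; exact hx)]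
      simp [hp]
    · have hx : key x = 0 := by rw [hkey]; simp [hp]
      rw [pv_insertBy_mid x c v key hx hc hv]
      rw [ih (c ++ [x]) v (by
        intro a ha
        rcases List.mem_append.mp ha with h | h
        · exact hc a h
        · simp at h; subst h; exact hx) hv]
      simp [hp]

theorem pv_rearrB_eq (w : String) :
    pvRearrB w = String.ofList
      (w.toList.filter (fun c => !PySem.Set.contains pvVowels c)
       ++ w.toList.filter (fun c => PySem.Set.contains pvVowels c)) := by
  unfold pvRearrB
  rw [PySem.List.sorted_eq_foldl_insertBy]
  have := pv_foldl_insertBy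
    (fun c => if PySem.Set.contains pvVowels c then (1 : Int) else 0)
    (fun c => PySem.Set.contains pvVowels c)
    (fun a => rfl) w.toList [] [] (by simp) (by simp)
  simp only [List.nil_append] at this
  rw [this]

-- A's partition loop leaves (vowels, consonants) = the two filters
theorem pv_partition_foldl (l v c : List Char) :
    l.foldl
      (fun (acc : List Char × List Char) letter =>
        if PySem.Set.contains pvVowels letter then (acc.1 ++ [letter], acc.2)
        else (acc.1, acc.2 ++ [letter]))
      (v, c)
    = (v ++ l.filter (fun x => PySem.Set.contains pvVowels x),
       c ++ l.filter (fun x => !PySem.Set.contains pvVowels x)) := by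
  induction l generalizing v c with
  | nil => simp
  | cons a t ih =>
    rw [List.foldl_cons]
    by_cases h : PySem.Set.contains pvVowels a = true
    · rw [if_pos h, ih]
      simp only [List.filter_cons, h]
      simp
    · rw [if_neg h, ih]
      simp only [List.filter_cons, h, Bool.not_false]
      simp

theorem pv_rearr_eq (w : String) : pvRearrangeA w = pvRearrB w := by
  unfold pvRearrangeA
  rw [pv_partition_foldl, pv_rearrB_eq]
  simp

-- A's loop equals the interleaved list -----------------------------------

theorem pv_key (ws : List String) (k : Nat) (acc : List String) :
    (PySem.List.enumerate ws (2 * (k : Int))).foldl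
      (fun acc (p : Int × String) =>
        if PySem.Int.mod p.1 2 = 0 then
          acc ++ [(PySem.Str.slice? p.2 none none (-1)).getD ""]
        else acc ++ [pvRearrangeA p.2])
      acc
    = acc ++ pvInterleave ws := by
  induction ws using pvInterleave.induct generalizing k acc with
  | case1 => simp [PySem.List.enumerate_nil, pvInterleave]
  | case2 w =>
    simp [PySem.List.enumerate_cons, PySem.List.enumerate_nil, pvInterleave,
      PySem.Str.slice?_none_none_neg_one]
  | case3 w nxt t ih =>
    have h0 : PySem.Int.mod (2 * (k : Int)) 2 = 0 := by
      rw [PySem.Int.mod_eq_emod_of_pos (by norm_num)]; omega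
    have h1 : ¬ PySem.Int.mod (2 * (k : Int) + 1) 2 = 0 := by
      rw [PySem.Int.mod_eq_emod_of_pos (by norm_num)]; omega
    have h2 : (2 * (k : Int) + 1 + 1) = 2 * ((k + 1 : Nat) : Int) := by push_cast; ring
    simp only [PySem.List.enumerate_cons, List.foldl_cons]
    rw [if_pos h0, if_neg h1, h2, ih (k + 1)]
    simp [pvInterleave, pv_rearr_eq, PySem.Str.slice?_none_none_neg_one]

-- B's slices are pvEvery2 ------------------------------------------------

theorem pv_filterMap_range (α : Type) :
    ∀ (ys : List α),
    (List.range ((ys.length + 1) / 2)).filterMap (fun m => ys[2 * m]?) = pvEvery2 ys := by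
  intro ys
  induction ys using pvEvery2.induct with
  | case1 => simp [pvEvery2]
  | case2 a => simp [pvEvery2, List.range_succ]
  | case3 a b t ih =>
    have hlen : ((a :: b :: t).length + 1) / 2 = (t.length + 1) / 2 + 1 := by
      simp [List.length_cons]; omega
    rw [hlen, List.range_succ_eq_map, List.filterMap_cons, List.filterMap_map]
    have harg : ((fun m => (a :: b :: t)[2 * m]?) ∘ Nat.succ) = (fun m => t[2 * m]?) := by
      funext m
      show (a :: b :: t)[2 * Nat.succ m]? = t[2 * m]?
      have : 2 * Nat.succ m = 2 * m + 1 + 1 := by omega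
      rw [this]
      simp
    rw [harg, ih]
    simp [pvEvery2]

theorem pv_slice2_none (α : Type) (xs : List α) :
    PySem.List.slice? xs none none 2 = some (pvEvery2 xs) := by
  simp only [PySem.List.slice?, PySem.List.sliceIndices]
  norm_num
  have hif : (if 0 < xs.length then (((xs.length : Int) + 2 - 1) / 2).toNat else 0)
      = (xs.length + 1) / 2 := by
    split_ifs <;> omega
  have harg : (fun m : Nat => xs[((2 : Int) * (m : Int)).toNat]?) = (fun m : Nat => xs[2 * m]?) := by
    funext m
    have h2 : ((2 : Int) * (m : Int)).toNat = 2 * m := by omega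
    rw [h2]
  rw [hif, harg]
  exact pv_filterMap_range α xs

theorem pv_slice2_one (α : Type) (xs : List α) :
    PySem.List.slice? xs (some 1) none 2 = some (pvEvery2 xs.tail) := by
  cases xs with
  | nil => simp [PySem.List.slice?, PySem.List.sliceIndices, pvEvery2]
  | cons a t =>
    simp only [PySem.List.slice?, PySem.List.sliceIndices]
    norm_num
    have hif : (if 0 < t.length then (((t.length : Int) + 2 - 1) / 2).toNat else 0)
        = (t.length + 1) / 2 := by
      split_ifs <;> omega
    have harg : (fun m : Nat => (a :: t)[((1 : Int) + 2 * (m : Int)).toNat]?)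
        = (fun m : Nat => t[2 * m]?) := by
      funext m
      have : ((1 : Int) + 2 * (m : Int)).toNat = 2 * m + 1 := by omega
      rw [this]
      simp
    rw [hif, harg]
    exact pv_filterMap_range α t

-- the zip-interleave of the two transformed groups is pvInterleave --------

theorem pv_merge (ws : List String) :
    (let evens := (pvEvery2 ws).map (fun w => (PySem.Str.slice? w none none (-1)).getD "")
     let odds := (pvEvery2 ws.tail).map pvRearrB
     let merged := (evens.zip odds).flatMap (fun p => [p.1, p.2])
     if PySem.List.len odds < PySem.List.len evens
     then merged ++ [(PySem.List.pyGet? evens (-1)).getD ""] else merged)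
    = pvInterleave ws := by
  induction ws using pvInterleave.induct with
  | case1 => simp [pvEvery2, pvInterleave, PySem.List.len]
  | case2 w =>
    simp [pvEvery2, pvInterleave, PySem.List.len, PySem.List.pyGet?_neg_one,
      PySem.Str.slice?_none_none_neg_one]
  | case3 w nxt t ih =>
    have htail : (w :: nxt :: t).tail = nxt :: t := rfl
    rw [htail, pvEvery2_cons nxt t]
    have hev : pvEvery2 (w :: nxt :: t) = w :: pvEvery2 t := by simp [pvEvery2]
    rw [hev]
    simp only at ih ⊢
    by_cases hc : PySem.List.len ((pvEvery2 t.tail).map pvRearrB)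
        < PySem.List.len ((pvEvery2 t).map (fun w => (PySem.Str.slice? w none none (-1)).getD ""))
    · have hne : (pvEvery2 t).map (fun w => (PySem.Str.slice? w none none (-1)).getD "") ≠ [] := by
        intro h
        rw [h] at hc
        simp [PySem.List.len] at hc
        omega
      have hlt : PySem.List.len (pvRearrB nxt :: (pvEvery2 t.tail).map pvRearrB)
          < PySem.List.len ((PySem.Str.slice? w none none (-1)).getD ""
              :: (pvEvery2 t).map (fun w => (PySem.Str.slice? w none none (-1)).getD "")) := by
        simp only [PySem.List.len, List.length_cons] at hc ⊢
        omega
      simp only [List.map_cons, List.zip_cons_cons, List.flatMap_cons, if_pos hlt]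
      rw [if_pos hc] at ih
      rw [PySem.List.pyGet?_neg_one] at ih ⊢
      rw [pv_getLast?_cons _ _ hne]
      simp only [pvInterleave]
      rw [← ih]
      simp [PySem.Str.slice?_none_none_neg_one]
    · have hge : ¬ PySem.List.len (pvRearrB nxt :: (pvEvery2 t.tail).map pvRearrB)
          < PySem.List.len ((PySem.Str.slice? w none none (-1)).getD ""
              :: (pvEvery2 t).map (fun w => (PySem.Str.slice? w none none (-1)).getD "")) := by
        simp only [PySem.List.len, List.length_cons] at hc ⊢
        omega
      simp only [List.map_cons, List.zip_cons_cons, List.flatMap_cons, if_neg hge]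
      rw [if_neg hc] at ih
      simp only [pvInterleave]
      rw [← ih]
      simp [PySem.Str.slice?_none_none_neg_one]

-- ===== VERDICT (by name: the statement is the Claim_ definition above) =====
theorem encrypt_sentence_spec : Claim_equal_encrypt_sentence := by
  intro s _
  show encrypt_sentence s = encrypt_sentence_alt s
  have hA := pv_key (PySem.Str.split₀ s) 0 []
  simp only [Nat.cast_zero, mul_zero, List.nil_append] at hA
  rw [PySem.List.enumerate_eq_map_pyRange (PySem.Str.split₀ s) "", List.foldl_map] at hA
  simp only [encrypt_sentence, encrypt_sentence_alt]
  rw [hA, pv_slice2_none, pv_slice2_one]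
  simp only [Option.getD_some]
  rw [pv_merge]
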